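-- pv_equiv track=rewrite | github.com/badou-Michael/badouai-ai-special-2024 | PanDawson/week13/fasterrcnn.py | get_img_output_length
-- ===== SOURCE A (Python) =====
-- def get_img_output_length(width, height):
--     def get_output_length(input_length):
--         # input_length += 6
--         filter_sizes = [7, 3, 1, 1]
--         padding = [3,1,0,0]
--         stride = 2
--         for i in range(4):
--             # input_length = (input_length - filter_size + stride) // stride
--             input_length = (input_length+2*padding[i]-filter_sizes[i]) // stride + 1
--         return input_length
--     return get_output_length(width), get_output_length(height)
-- ===== SOURCE B (Python) =====
-- def get_img_output_length(width, height):
--     # Four identical stride-2 halvings collapse to floor((x+15)/16).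
--     return (width + 15) // 16, (height + 15) // 16
-- ===== Notes on version B (the rewrite author's own statement) =====
-- stated objective: simpler
-- what changed: Replaced the four-iteration loop over filter/padding arrays by the closed form (x+15)//16 per dimension.
import Mathlib
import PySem

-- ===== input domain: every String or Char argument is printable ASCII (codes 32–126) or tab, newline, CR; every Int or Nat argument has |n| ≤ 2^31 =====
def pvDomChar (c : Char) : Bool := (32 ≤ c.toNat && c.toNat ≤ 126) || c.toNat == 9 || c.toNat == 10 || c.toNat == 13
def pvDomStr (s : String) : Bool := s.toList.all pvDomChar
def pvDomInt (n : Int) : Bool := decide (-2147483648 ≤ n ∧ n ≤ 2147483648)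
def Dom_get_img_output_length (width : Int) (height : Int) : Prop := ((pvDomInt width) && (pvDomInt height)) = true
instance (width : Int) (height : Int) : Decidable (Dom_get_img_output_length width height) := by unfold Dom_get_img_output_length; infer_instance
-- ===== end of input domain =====

-- B replaces A's four-step loop over filter/padding arrays by the closed form (x+15)//16 (simpler).

-- ===== PORT A =====
-- inner helper get_output_length: for i in range(4): x = (x + 2*padding[i] - filter_sizes[i]) // 2 + 1
def pvGetOutputLength (input_length : Int) : Int :=
  let filter_sizes : List Int := [7, 3, 1, 1]
  let padding : List Int := [3, 1, 0, 0]
  let stride : Int := 2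
  (PySem.List.pyRange 0 4 1).foldl
    (fun x i =>
      PySem.Int.floordiv (x + 2 * (PySem.List.pyGetD padding i 0) - (PySem.List.pyGetD filter_sizes i 0)) stride + 1)
    input_length

def get_img_output_length (width : Int) (height : Int) : Int × Int :=
  (pvGetOutputLength width, pvGetOutputLength height)

-- ===== PORT B =====
def get_img_output_length_alt (width : Int) (height : Int) : Int × Int :=
  (PySem.Int.floordiv (width + 15) 16, PySem.Int.floordiv (height + 15) 16)

-- ===== PRECONDITION & SPEC =====
def Spec_get_img_output_length (width : Int) (height : Int) (out : Int × Int) : Prop := out = get_img_output_length_alt width height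
instance (width : Int) (height : Int) (out : Int × Int) : Decidable (Spec_get_img_output_length width height out) := by unfold Spec_get_img_output_length; infer_instance

-- ===== CLAIM (what is proved, stated in full; the proofs are below) =====
def Claim_equal_get_img_output_length : Prop := ∀ (width : Int) (height : Int), Dom_get_img_output_length width height → Spec_get_img_output_length width height (get_img_output_length width height)

-- ===== LEMMAS AND PROOFS =====
theorem pvGetOutputLength_closed (x : Int) :
    pvGetOutputLength x = PySem.Int.floordiv (x + 15) 16 := by
  have hr : PySem.List.pyRange 0 4 1 = [0, 1, 2, 3] := by decide
  have hp0 : PySem.List.pyGetD ([3, 1, 0, 0] : List Int) 0 0 = 3 := by decide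
  have hp1 : PySem.List.pyGetD ([3, 1, 0, 0] : List Int) 1 0 = 1 := by decide
  have hp2 : PySem.List.pyGetD ([3, 1, 0, 0] : List Int) 2 0 = 0 := by decide
  have hp3 : PySem.List.pyGetD ([3, 1, 0, 0] : List Int) 3 0 = 0 := by decide
  have hf0 : PySem.List.pyGetD ([7, 3, 1, 1] : List Int) 0 0 = 7 := by decide
  have hf1 : PySem.List.pyGetD ([7, 3, 1, 1] : List Int) 1 0 = 3 := by decide
  have hf2 : PySem.List.pyGetD ([7, 3, 1, 1] : List Int) 2 0 = 1 := by decide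
  have hf3 : PySem.List.pyGetD ([7, 3, 1, 1] : List Int) 3 0 = 1 := by decide
  have h2 : ∀ a : Int, a.fdiv 2 = a / 2 := fun a => Int.fdiv_eq_ediv_of_nonneg a (by norm_num)
  have h16 : ∀ a : Int, a.fdiv 16 = a / 16 := fun a => Int.fdiv_eq_ediv_of_nonneg a (by norm_num)
  simp only [pvGetOutputLength, hr, List.foldl, hp0, hp1, hp2, hp3, hf0, hf1, hf2, hf3,
    PySem.Int.floordiv, h2, h16]
  omega

-- ===== VERDICT (by name: the statement is the Claim_ definition above) =====
theorem get_img_output_length_spec : Claim_equal_get_img_output_length := by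
  intro w h _
  unfold Spec_get_img_output_length get_img_output_length get_img_output_length_alt
  rw [pvGetOutputLength_closed, pvGetOutputLength_closed]
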